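-- pv_equiv track=rewrite | github.com/tamil-phy/tamil_tokenizer | tamil_tokenizer/parsers/core_parser.py | _loop_main
-- ===== SOURCE A (Python) =====
-- from typing import Dict, List, Optional, Tuple, Any, Set
--
-- def _loop_main(deeper_inner_list: List[str],
--                verb_list: List[str],
--                noun_list: List[str]) -> List[List[str]]:
--     """
--     Generate all combinations with VERB/NOUN substituted.
--
--     Args:
--         deeper_inner_list: Pattern with VERB/NOUN placeholders
--         verb_list: List of verbs to substitute
--         noun_list: List of nouns to substitute
--
--     Returns:
--         List of all possible combinations
--     """
--     result_list_of_list = []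
--
--     # Find indices of VERB and NOUN
--     has_verb = "VERB" in deeper_inner_list
--     has_noun = "NOUN" in deeper_inner_list
--
--     if not has_verb and not has_noun:
--         return [deeper_inner_list]
--
--     # Generate combinations
--     substitutions = []
--     for i, item in enumerate(deeper_inner_list):
--         if item == "VERB":
--             substitutions.append([(i, v) for v in verb_list[:100]])  # Limit for performance
--         elif item == "NOUN":
--             substitutions.append([(i, n) for n in noun_list[:100]])
--         else:
--             substitutions.append([(i, item)])
--
--     # Generate cartesian product
--     from itertools import product
--     for combo in product(*substitutions):
--         result = [""] * len(deeper_inner_list)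
--         for idx, val in combo:
--             result[idx] = val
--         result_list_of_list.append(result)
--
--     return result_list_of_list
-- ===== SOURCE B (Python) =====
-- from typing import List
--
-- def _loop_main(deeper_inner_list: List[str],
--                verb_list: List[str],
--                noun_list: List[str]) -> List[List[str]]:
--     if "VERB" not in deeper_inner_list and "NOUN" not in deeper_inner_list:
--         return [deeper_inner_list]
--     opts = []
--     for item in deeper_inner_list:
--         if item == "VERB":
--             opts.append(verb_list[:100])
--         elif item == "NOUN":
--             opts.append(noun_list[:100])
--         else:
--             opts.append([item])
--     total = 1
--     for o in opts:
--         total *= len(o)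
--     out = []
--     for r in range(total):
--         row = []
--         rem = r
--         for o in reversed(opts):
--             rem, j = divmod(rem, len(o))
--             row.append(o[j])
--         row.reverse()
--         out.append(row)
--     return out
-- ===== Notes on version B (the rewrite author's own statement) =====
-- stated objective: alternative
-- what changed: Instead of expanding the Cartesian product (itertools.product over (index,value) tuples then scattering into a [""]*n template), B counts the combinations and reconstructs each row independently by mixed-radix divmod decoding of its rank.
import Mathlib
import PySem

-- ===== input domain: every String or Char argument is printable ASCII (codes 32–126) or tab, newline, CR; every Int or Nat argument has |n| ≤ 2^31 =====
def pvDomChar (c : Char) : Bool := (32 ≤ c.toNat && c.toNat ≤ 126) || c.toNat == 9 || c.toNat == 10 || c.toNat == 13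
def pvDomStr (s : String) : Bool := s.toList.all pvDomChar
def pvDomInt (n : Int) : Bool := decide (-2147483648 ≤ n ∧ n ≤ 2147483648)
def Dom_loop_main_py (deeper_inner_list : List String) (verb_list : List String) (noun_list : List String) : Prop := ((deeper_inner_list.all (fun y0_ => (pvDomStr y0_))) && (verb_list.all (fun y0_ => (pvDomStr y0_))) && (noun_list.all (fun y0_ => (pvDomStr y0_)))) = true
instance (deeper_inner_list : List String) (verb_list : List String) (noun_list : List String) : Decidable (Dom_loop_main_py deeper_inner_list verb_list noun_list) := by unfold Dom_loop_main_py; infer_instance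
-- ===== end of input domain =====

-- B replaces the itertools.product expansion (index/value tuples + template scatter) by
-- counting the combinations and decoding each row independently from its rank by mixed-radix
-- divmod (objective: alternative algorithm of the same cost).

-- ===== PORT A =====
-- substitutions list built by 'for i, item in enumerate(deeper_inner_list)'
def pvSubsA (verb_list noun_list : List String) : Nat → List String → List (List (Nat × String))
  | _, [] => []
  | i, item :: rest =>
    (if item = "VERB" then (verb_list.take 100).map (fun v => (i, v))   -- verb_list[:100]
     else if item = "NOUN" then (noun_list.take 100).map (fun n => (i, n))
     else [(i, item)]) :: pvSubsA verb_list noun_list (i + 1) rest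

-- itertools.product(*substitutions), row-major order
def pvProductA {α : Type} : List (List α) → List (List α)
  | [] => [[]]
  | l :: rest => l.flatMap (fun x => (pvProductA rest).map (fun c => x :: c))

-- result = [""] * n; for idx, val in combo: result[idx] = val
def pvScatterA (n : Nat) (combo : List (Nat × String)) : List String :=
  combo.foldl (fun r iv => r.set iv.1 iv.2) (List.replicate n "")

def loop_main_py (deeper_inner_list : List String) (verb_list : List String) (noun_list : List String) : List (List String) :=
  if ¬ ("VERB" ∈ deeper_inner_list) ∧ ¬ ("NOUN" ∈ deeper_inner_list) then
    [deeper_inner_list]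
  else
    (pvProductA (pvSubsA verb_list noun_list 0 deeper_inner_list)).foldl
      (fun acc combo => acc ++ [pvScatterA deeper_inner_list.length combo]) []

-- ===== PORT B =====
-- the if/elif/else choosing the option list appended for one item
def pvOptsB (verb_list noun_list : List String) (item : String) : List String :=
  if item = "VERB" then verb_list.take 100
  else if item = "NOUN" then noun_list.take 100
  else [item]

-- inner loop 'for o in reversed(opts): rem, j = divmod(rem, len(o)); row.append(o[j])'
-- then 'row.reverse()'.  divmod on the nonnegative ints here is Nat div/mod; the index j is
-- always in range when the loop runs (total > 0 forces every len(o) > 0), so o[j] is o.getD j "".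
def pvDecodeB (opts : List (List String)) (r : Nat) : List String :=
  ((opts.reverse).foldl
    (fun (st : Nat × List String) o =>
      (st.1 / o.length, st.2 ++ [o.getD (st.1 % o.length) ""]))
    (r, [])).2.reverse

def loop_main_py_alt (deeper_inner_list : List String) (verb_list : List String) (noun_list : List String) : List (List String) :=
  if ¬ ("VERB" ∈ deeper_inner_list) ∧ ¬ ("NOUN" ∈ deeper_inner_list) then
    [deeper_inner_list]
  else
    let opts := deeper_inner_list.map (pvOptsB verb_list noun_list)
    let total := opts.foldl (fun a o => a * o.length) 1
    (List.range total).foldl (fun out r => out ++ [pvDecodeB opts r]) []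

-- ===== PRECONDITION & SPEC =====
def Spec_loop_main_py (deeper_inner_list : List String) (verb_list : List String) (noun_list : List String) (out : List (List String)) : Prop := out = loop_main_py_alt deeper_inner_list verb_list noun_list
instance (deeper_inner_list : List String) (verb_list : List String) (noun_list : List String) (out : List (List String)) : Decidable (Spec_loop_main_py deeper_inner_list verb_list noun_list out) := by unfold Spec_loop_main_py; infer_instance

-- ===== CLAIM (what is proved, stated in full; the proofs are below) =====
def Claim_equal_loop_main_py : Prop := ∀ (deeper_inner_list : List String) (verb_list : List String) (noun_list : List String), Dom_loop_main_py deeper_inner_list verb_list noun_list → Spec_loop_main_py deeper_inner_list verb_list noun_list (loop_main_py deeper_inner_list verb_list noun_list)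

-- ===== LEMMAS AND PROOFS =====

-- value-level row-major cartesian product of option lists (shared reference point)
def pvProdL : List (List String) → List (List String)
  | [] => [[]]
  | o :: rest => o.flatMap (fun x => (pvProdL rest).map (fun c => x :: c))

-- attach consecutive indices starting at k
def pvIdxFrom (k : Nat) : List String → List (Nat × String)
  | [] => []
  | v :: vs => (k, v) :: pvIdxFrom (k + 1) vs

theorem pvProductA_subsA (verb_list noun_list : List String) (items : List String) (k : Nat) :
    pvProductA (pvSubsA verb_list noun_list k items)
      = (pvProdL (items.map (pvOptsB verb_list noun_list))).map (pvIdxFrom k) := by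
  induction items generalizing k with
  | nil => simp [pvSubsA, pvProductA, pvProdL, pvIdxFrom]
  | cons x xs ih =>
    simp only [pvSubsA, pvProductA, List.map_cons, pvProdL, ih, pvOptsB]
    split_ifs <;>
      simp [-List.map_take, List.flatMap_map, List.map_flatMap, List.map_map, Function.comp_def, pvIdxFrom]

theorem pvScatter_idxFrom (vs pre : List String) :
    (pvIdxFrom pre.length vs).foldl (fun r iv => r.set iv.1 iv.2)
        (pre ++ List.replicate vs.length "") = pre ++ vs := by
  induction vs generalizing pre with
  | nil => simp [pvIdxFrom]
  | cons v vs ih =>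
    simp only [pvIdxFrom, List.foldl_cons, List.length_cons, List.replicate_succ]
    have hset : (pre ++ "" :: List.replicate vs.length "").set pre.length v
        = (pre ++ [v]) ++ List.replicate vs.length "" := by
      rw [List.set_append_right _ _ (le_refl pre.length)]
      simp
    rw [hset]
    have := ih (pre ++ [v])
    simpa using this

theorem pvProdL_length (opts : List (List String)) :
    ∀ vs ∈ pvProdL opts, vs.length = opts.length := by
  induction opts with
  | nil => intro vs h; simp [pvProdL] at h; simp [h]
  | cons o os ih =>
    intro vs h
    simp only [pvProdL, List.mem_flatMap, List.mem_map] at h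
    obtain ⟨x, _, c, hc, rfl⟩ := h
    simp [ih c hc]

-- the accumulator of B's inner fold factors out
theorem pvFoldAcc (rl : List (List String)) (r : Nat) (acc : List String) :
    rl.foldl (fun (st : Nat × List String) o =>
        (st.1 / o.length, st.2 ++ [o.getD (st.1 % o.length) ""])) (r, acc)
      = ((rl.foldl (fun (st : Nat × List String) o =>
            (st.1 / o.length, st.2 ++ [o.getD (st.1 % o.length) ""])) (r, [])).1,
         acc ++ (rl.foldl (fun (st : Nat × List String) o =>
            (st.1 / o.length, st.2 ++ [o.getD (st.1 % o.length) ""])) (r, [])).2) := by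
  induction rl generalizing r acc with
  | nil => simp
  | cons o rest ih =>
    simp only [List.foldl_cons, List.nil_append]
    rw [ih, ih (r / o.length) [o.getD (r % o.length) ""]]
    simp

-- recursive characterization of B's inner loop over the reversed list
def pvG : List (List String) → Nat → List String
  | [], _ => []
  | o :: rest, r => o.getD (r % o.length) "" :: pvG rest (r / o.length)

theorem pvDecodeB_eq_G (opts : List (List String)) (r : Nat) :
    pvDecodeB opts r = (pvG opts.reverse r).reverse := by
  unfold pvDecodeB
  congr 1
  generalize opts.reverse = rl
  induction rl generalizing r with
  | nil => simp [pvG]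
  | cons o rest ih =>
    simp only [List.foldl_cons, pvG]
    rw [pvFoldAcc]
    simpa using ih (r / o.length)

theorem pvRangeMul {α : Type} (f : Nat → α) (a b : Nat) :
    (List.range (a * b)).map f
      = (List.range a).flatMap (fun q => (List.range b).map (fun j => f (q * b + j))) := by
  induction a with
  | zero => simp
  | succ a ih =>
    have : (a + 1) * b = a * b + b := by ring
    rw [this, List.range_add, List.map_append, ih, List.range_succ, List.flatMap_append]
    simp [List.map_map, Function.comp_def]

theorem pvFlatMapSingle {α β : Type} (f : α → β) (l : List α) :
    l.flatMap (fun x => [f x]) = l.map f := by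
  induction l with
  | nil => rfl
  | cons a l ih => simp [ih]

theorem pvProdL_snoc (l : List (List String)) (o : List String) :
    pvProdL (l ++ [o]) = (pvProdL l).flatMap (fun c => o.map (fun x => c ++ [x])) := by
  induction l with
  | nil => simp [pvProdL, pvFlatMapSingle]
  | cons p l ih =>
    simp only [List.cons_append, pvProdL, ih]
    simp [List.map_flatMap, List.flatMap_assoc, List.flatMap_map, List.map_map,
      Function.comp_def]

theorem pvRange_getD (o : List String) :
    (List.range o.length).map (fun j => o.getD j "") = o := by
  apply List.ext_getElem
  · simp
  · intro i h1 h2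
    simp [List.getElem?_eq_getElem h2]

theorem pvDecode_enum (opts : List (List String)) :
    (List.range (opts.foldl (fun a o => a * o.length) 1)).map (pvDecodeB opts) = pvProdL opts := by
  induction opts using List.reverseRecOn with
  | nil => simp [pvDecodeB, pvProdL, List.range_succ]
  | append_singleton l o ih =>
    have hP : (l ++ [o]).foldl (fun a o => a * o.length) 1
        = (l.foldl (fun a o => a * o.length) 1) * o.length := by
      rw [List.foldl_append]; rfl
    rw [hP, pvProdL_snoc, ← ih]
    rw [pvRangeMul (pvDecodeB (l ++ [o])) _ o.length]
    rw [List.flatMap_map]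
    refine congrArg (List.range (l.foldl (fun a o => a * o.length) 1)).flatMap (funext fun q => ?_)
    conv_rhs => rw [← pvRange_getD o, List.map_map]
    refine List.map_congr_left fun j hj => ?_
    have hjb : j < o.length := List.mem_range.mp hj
    have hb : 0 < o.length := Nat.lt_of_le_of_lt (Nat.zero_le _) hjb
    rw [pvDecodeB_eq_G, pvDecodeB_eq_G]
    simp only [List.reverse_append, List.reverse_singleton,
      List.singleton_append, pvG]
    have hmod : (q * o.length + j) % o.length = j := by
      rw [Nat.mul_comm, Nat.mul_add_mod, Nat.mod_eq_of_lt hjb]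
    have hdiv : (q * o.length + j) / o.length = q := by
      rw [Nat.mul_comm q, Nat.mul_add_div hb, Nat.div_eq_of_lt hjb, Nat.add_zero]
    rw [hmod, hdiv]
    simp

-- ===== VERDICT (by name: the statement is the Claim_ definition above) =====
theorem loop_main_py_spec : Claim_equal_loop_main_py := by
  intro d v n _
  unfold Spec_loop_main_py loop_main_py loop_main_py_alt
  split_ifs
  · rfl
  · rw [PySem.List.foldl_append_singleton_eq_map, PySem.List.foldl_append_singleton_eq_map,
        pvProductA_subsA, List.map_map, pvDecode_enum]
    refine (List.map_congr_left fun vs hvs => ?_).trans (List.map_id _)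
    have hl : vs.length = d.length := by
      have := pvProdL_length (d.map (pvOptsB v n)) vs hvs
      simpa using this
    have := pvScatter_idxFrom vs []
    simp only [List.length_nil, List.nil_append] at this
    simp only [Function.comp_def, pvScatterA]
    rw [← hl]; exact this
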